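-- pv_equiv track=rewrite | github.com/DLSK-study/letzgorats | Implementation/12-10_Locks and keys.py | solution
-- ===== SOURCE A (Python) =====
-- def rotation(key):
--     m = len(key)
--     rkey = [[0]*m for _ in range(m)]
--
--     for i in range(m):
--         for j in range(m):
--             rkey[j][m-1-i] = key[i][j]
--
--     return rkey
--
-- def test(key,lock,startX,startY,expandSize,start,end):
--     expandList = [[0]*expandSize for _ in range(expandSize)]
--
--     # expandList에 key 추가
--     for i in range(len(key)):
--         for j in range(len(key)):
--             expandList[startX+i][startY+j] += key[i][j]
--
--     # expandList에 lock 추가하면서 기존 값이랑 더하기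
--     for i in range(start,end):
--         for j in range(start,end):
--             expandList[i][j] += lock[i-start][j-start]
--             if expandList[i][j] !=1:
--                 return False
--     return True
--
-- def solution(key, lock):
--     m = len(key)  # key
--     n = len(lock) # lock
--     expandSize = n+(m-1)*2
--
--     start = m-1 # expandList에서 lock의 시작 지점
--     end = start + n # expandList에서 lock이 끝나는 지점
--
--     for _ in range(4):
--         for i in range(end):
--             for j in range(end):
--                 if test(key,lock,i,j,expandSize,start,end):
--                     return True
--         key = rotation(key)
--
--     return False
-- ===== SOURCE B (Python) =====
-- def solution(key, lock):
--     # Sparse constraint matching: instead of scanning every placement over the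
--     # whole board, collect the lock's "deficit" cells (value != 1) and the key's
--     # nonzero cells; any valid placement must align some key cell of value
--     # 1 - lock[r0][c0] with the first deficit cell, so only those candidate
--     # offsets are generated and each is verified on the sparse cell sets alone.
--     m, n = len(key), len(lock)
--     deficits = [(r, c) for r in range(n) for c in range(n) if lock[r][c] != 1]
--     cells = [(a, b, key[a][b]) for a in range(m) for b in range(m) if key[a][b]]
--     for _ in range(4):
--         cellset = set(cells)
--         if deficits:
--             r0, c0 = deficits[0]
--             want = 1 - lock[r0][c0]
--             cand = [(r0 - a, c0 - b) for (a, b, v) in cells if v == want]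
--         else:
--             cand = [(di, dj) for di in range(-(m - 1), n)
--                              for dj in range(-(m - 1), n)]
--         for di, dj in cand:
--             if all((r - di, c - dj, 1 - lock[r][c]) in cellset
--                    for r, c in deficits) \
--                and all(lock[a + di][b + dj] + v == 1
--                        for a, b, v in cells
--                        if 0 <= a + di < n and 0 <= b + dj < n):
--                 return True
--         cells = [(b, m - 1 - a, v) for a, b, v in cells]
--     return False
-- ===== Notes on version B (the rewrite author's own statement) =====
-- stated objective: faster
-- what changed: B replaces A's scan of every placement over a freshly allocated expanded board with sparse constraint matching: it extracts the lock's deficit cells (value != 1) and the key's nonzero cells once, generates only the candidate offsets that align a key cell of the required value with the first deficit cell, and verifies each candidate on those two sparse cell sets alone.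
-- outside the precondition, e.g. on solution([], [[1, 1, 1], [1, 1, 1], [1, 1, 1]]): A returns False, B returns True; on solution([], [[1, 1], [1, 1]]): A raises IndexError, B returns True; on solution([], [[0, 1], [1, 0]]): A raises IndexError, B returns False
import Mathlib
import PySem

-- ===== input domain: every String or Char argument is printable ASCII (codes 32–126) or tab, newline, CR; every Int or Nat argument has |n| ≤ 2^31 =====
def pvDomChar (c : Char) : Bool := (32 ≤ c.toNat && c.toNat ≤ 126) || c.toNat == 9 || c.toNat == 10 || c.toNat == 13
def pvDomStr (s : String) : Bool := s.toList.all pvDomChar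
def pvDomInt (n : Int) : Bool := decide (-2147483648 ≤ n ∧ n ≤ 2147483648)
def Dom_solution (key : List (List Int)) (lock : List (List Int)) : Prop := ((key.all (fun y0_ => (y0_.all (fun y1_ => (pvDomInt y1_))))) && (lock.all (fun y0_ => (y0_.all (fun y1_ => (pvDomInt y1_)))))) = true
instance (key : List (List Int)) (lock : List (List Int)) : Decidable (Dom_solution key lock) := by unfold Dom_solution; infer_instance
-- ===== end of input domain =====

-- B re-implements A's key/lock search by sparse constraint matching: it extracts the lock's
-- deficit cells (value ≠ 1) and the key's nonzero cells once, generates only the candidate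
-- offsets aligning a key cell of the required value with the first deficit cell, and verifies
-- each candidate on those sparse sets alone (objective: faster; no expanded board, no full scan).


-- ===== PORT A =====
-- 2D read/write helpers: xs[i][j] and xs[i][j] = v (all indices A uses are in range inside Pre_)
def get2 (xs : List (List Int)) (i j : Nat) : Int := (xs.getD i []).getD j 0
def set2 (xs : List (List Int)) (i j : Nat) (v : Int) : List (List Int) :=
  xs.set i ((xs.getD i []).set j v)

-- rotation(key): rkey = m×m zeros; for i: for j: rkey[j][m-1-i] = key[i][j]
def pyRotation (key : List (List Int)) : List (List Int) :=
  let m := key.length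
  (List.range m).foldl (fun rkey i =>
    (List.range m).foldl (fun rkey j =>
      set2 rkey j (m - 1 - i) (get2 key i j)) rkey)
    (List.replicate m (List.replicate m (0 : Int)))

-- test(key,lock,startX,startY,expandSize,start,end): build expandList, add key, then add
-- lock cell by cell; the Option state is none once Python has returned False.
def test (key lock : List (List Int)) (startX startY expandSize start fin : Nat) : Bool :=
  let e0 := List.replicate expandSize (List.replicate expandSize (0 : Int))
  let e1 := (List.range key.length).foldl (fun E i =>
      (List.range key.length).foldl (fun E j =>
        set2 E (startX + i) (startY + j)
          (get2 E (startX + i) (startY + j) + get2 key i j)) E) e0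
  let res := (List.range' start (fin - start)).foldl (fun st i =>
      (List.range' start (fin - start)).foldl (fun st j =>
        st.bind fun E =>
          let v := get2 E i j + get2 lock (i - start) (j - start)
          if v ≠ 1 then none else some (set2 E i j v)) st) (some e1)
  res.isSome

-- the 'for _ in range(4): … key = rotation(key)' loop with early return True
def solLoop (lock : List (List Int)) (expandSize start fin : Nat) :
    Nat → List (List Int) → Bool
  | 0, _ => false
  | t + 1, key =>
    if (List.range fin).any (fun i => (List.range fin).any fun j =>
        test key lock i j expandSize start fin) then true
    else solLoop lock expandSize start fin t (pyRotation key)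

def solution (key : List (List Int)) (lock : List (List Int)) : Bool :=
  let m := key.length
  let n := lock.length
  let expandSize := n + (m - 1) * 2
  let start := m - 1
  let fin := start + n
  solLoop lock expandSize start fin 4 key

-- ===== PORT B =====
-- xs[i][j] for Int indices; B's own guards/invariants keep them nonnegative and in range
def getL (xs : List (List Int)) (i j : Int) : Int := (xs.getD i.toNat []).getD j.toNat 0

-- deficits = [(r, c) for r in range(n) for c in range(n) if lock[r][c] != 1]
def bDeficits (lock : List (List Int)) : List (Int × Int) :=
  (List.range lock.length).flatMap fun r =>
    (List.range lock.length).filterMap fun c =>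
      if get2 lock r c ≠ 1 then some ((r : Int), (c : Int)) else none

-- cells = [(a, b, key[a][b]) for a in range(m) for b in range(m) if key[a][b]]
def bCells (key : List (List Int)) : List (Int × Int × Int) :=
  (List.range key.length).flatMap fun a =>
    (List.range key.length).filterMap fun b =>
      if get2 key a b ≠ 0 then some ((a : Int), (b : Int), get2 key a b) else none

-- the body of B's `if all(...) and all(...)` for one candidate offset (di, dj)
def bCheck (lock : List (List Int)) (n : Int) (deficits : List (Int × Int))
    (cellset : PySem.Set (Int × Int × Int)) (cells : List (Int × Int × Int))
    (di dj : Int) : Bool :=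
  (deficits.all fun p =>
      PySem.Set.contains cellset (p.1 - di, p.2 - dj, 1 - getL lock p.1 p.2))
  && (cells.all fun c =>
      if 0 ≤ c.1 + di ∧ c.1 + di < n ∧ 0 ≤ c.2.1 + dj ∧ c.2.1 + dj < n
      then getL lock (c.1 + di) (c.2.1 + dj) + c.2.2 == 1 else true)

-- one rotation's work: cellset = set(cells); build cand; try every candidate offset
def bStep (lock : List (List Int)) (m n : Int) (deficits : List (Int × Int))
    (cells : List (Int × Int × Int)) : Bool :=
  let cellset : PySem.Set (Int × Int × Int) := PySem.Set.ofList cells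
  let cand : List (Int × Int) :=
    match deficits with
    | [] => (PySem.List.pyRange (-(m - 1)) n 1).flatMap fun di =>
             (PySem.List.pyRange (-(m - 1)) n 1).map fun dj => (di, dj)
    | (r0, c0) :: _ =>
      cells.filterMap fun c =>
        if c.2.2 = 1 - getL lock r0 c0 then some (r0 - c.1, c0 - c.2.1) else none
  cand.any fun p => bCheck lock n deficits cellset cells p.1 p.2

-- 'for _ in range(4): …; cells = [(b, m-1-a, v) for a, b, v in cells]' with early return True
def bLoop (lock : List (List Int)) (m n : Int) (deficits : List (Int × Int)) :
    Nat → List (Int × Int × Int) → Bool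
  | 0, _ => false
  | t + 1, cells =>
    if bStep lock m n deficits cells then true
    else bLoop lock m n deficits t (cells.map fun c => (c.2.1, m - 1 - c.1, c.2.2))

def solution_alt (key : List (List Int)) (lock : List (List Int)) : Bool :=
  bLoop lock (key.length : Int) (lock.length : Int) (bDeficits lock) 4 (bCells key)

-- ===== PRECONDITION & SPEC =====
-- Pre_ excludes (a) ragged inputs with a key row shorter than len(key) or a lock row shorter
-- than len(lock), on which A raises IndexError, and (b) the empty key (m = 0), on which A
-- raises IndexError for n = 2 and otherwise returns accidental values produced by Python's
-- negative-index wraparound on the shrunken expanded board.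
def Pre_solution (key : List (List Int)) (lock : List (List Int)) : Prop :=
  1 ≤ key.length ∧ (∀ row ∈ key, key.length ≤ row.length) ∧
    (∀ row ∈ lock, lock.length ≤ row.length)
instance (key : List (List Int)) (lock : List (List Int)) : Decidable (Pre_solution key lock) := by
  unfold Pre_solution; infer_instance
def pvWitness_solution : List (List Int) × List (List Int) :=
  ([[0, 0], [1, 0]], [[1, 1, 1], [1, 1, 0], [1, 0, 1]])
def Spec_solution (key : List (List Int)) (lock : List (List Int)) (out : Bool) : Prop := out = solution_alt key lock
instance (key : List (List Int)) (lock : List (List Int)) (out : Bool) : Decidable (Spec_solution key lock out) := by unfold Spec_solution; infer_instance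

-- ===== CLAIM (what is proved, stated in full; the proofs are below) =====
def Claim_equal_solution : Prop := ∀ (key : List (List Int)) (lock : List (List Int)), Dom_solution key lock → Pre_solution key lock → Spec_solution key lock (solution key lock)

-- ===== LEMMAS AND PROOFS =====

def Rect (R C : Nat) (xs : List (List Int)) : Prop :=
  xs.length = R ∧ ∀ row ∈ xs, row.length = C

theorem rect_row_len {R C : Nat} {E : List (List Int)} (hE : Rect R C E) {i : Nat}
    (hi : i < R) : (E.getD i []).length = C := by
  obtain ⟨hl, hr⟩ := hE
  have hiE : i < E.length := by omega
  rw [List.getD_eq_getElem?_getD, List.getElem?_eq_getElem hiE]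
  exact hr _ (E.getElem_mem hiE)

theorem get2_set2_ne (xs : List (List Int)) (i j x y : Nat) (v : Int)
    (h : ¬(x = i ∧ y = j)) : get2 (set2 xs i j v) x y = get2 xs x y := by
  simp only [get2, set2, List.getD_eq_getElem?_getD, List.getElem?_set]
  rcases eq_or_ne x i with rfl | hx
  · have hy : y ≠ j := by tauto
    split
    · split
      · simp [List.getElem?_set_ne (Ne.symm hy)]
      · simp [List.getElem?_eq_none (by omega : xs.length ≤ x)]
    · rfl
  · simp [Ne.symm hx]

theorem get2_set2_self (xs : List (List Int)) (i j : Nat) (v : Int)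
    (hi : i < xs.length) (hj : j < (xs.getD i []).length) :
    get2 (set2 xs i j v) i j = v := by
  simp only [get2, set2, List.getD_eq_getElem?_getD, List.getElem?_set]
  simp only [hi, if_true, Option.getD_some]
  have hlen : j < xs[i].length := by
    simpa [List.getD_eq_getElem?_getD, List.getElem?_eq_getElem hi] using hj
  rw [List.getElem?_set_self' ]
  simp [List.getElem?_eq_getElem hi, List.getElem?_eq_getElem hlen]

theorem get2_replicate (es x y : Nat) :
    get2 (List.replicate es (List.replicate es (0 : Int))) x y = 0 := by
  simp only [get2, List.getD_eq_getElem?_getD, List.getElem?_replicate]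
  split
  · simp [List.getElem?_replicate]; split <;> rfl
  · rfl

theorem rect_set2 {R C : Nat} {E : List (List Int)} (hE : Rect R C E) (i j : Nat) (v : Int)
    (hi : i < R) : Rect R C (set2 E i j v) := by
  obtain ⟨hl, hr⟩ := hE
  refine ⟨by simp [set2, hl], ?_⟩
  intro row hrow
  rcases List.mem_or_eq_of_mem_set hrow with h | rfl
  · exact hr _ h
  · rw [List.length_set]; exact rect_row_len ⟨hl, hr⟩ hi

theorem addAll {R C : Nat} (f : Nat × Nat → Int) :
    ∀ (ps : List (Nat × Nat)) (E : List (List Int)), Rect R C E →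
      (∀ p ∈ ps, p.1 < R ∧ p.2 < C) → ps.Nodup →
      Rect R C (ps.foldl (fun E p => set2 E p.1 p.2 (get2 E p.1 p.2 + f p)) E) ∧
      ∀ x y, get2 (ps.foldl (fun E p => set2 E p.1 p.2 (get2 E p.1 p.2 + f p)) E) x y
           = get2 E x y + (if (x, y) ∈ ps then f (x, y) else 0) := by
  intro ps
  induction ps with
  | nil => intro E hE _ _; exact ⟨hE, by simp⟩
  | cons p tl ih =>
    obtain ⟨p1, p2⟩ := p
    intro E hE hb hnd
    have hp := hb (p1, p2) (List.mem_cons_self ..)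
    simp only at hp
    have hE' : Rect R C (set2 E p1 p2 (get2 E p1 p2 + f (p1, p2))) :=
      rect_set2 hE _ _ _ hp.1
    obtain ⟨ih1, ih2⟩ := ih _ hE' (fun q hq => hb q (List.mem_cons_of_mem _ hq))
      (List.Nodup.of_cons hnd)
    constructor
    · simpa using ih1
    · intro x y
      simp only [List.foldl_cons]
      rw [ih2]
      by_cases hxy : x = p1 ∧ y = p2
      · obtain ⟨rfl, rfl⟩ := hxy
        have hnotin : (x, y) ∉ tl := by
          have := (List.nodup_cons.mp hnd).1; simpa using this
        rw [get2_set2_self _ _ _ _ (by obtain ⟨hl,_⟩ := hE; omega)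
          (by rw [rect_row_len hE hp.1]; exact hp.2)]
        simp [hnotin]
      · rw [get2_set2_ne _ _ _ _ _ _ hxy]
        have hmem : ((x, y) ∈ (p1, p2) :: tl) ↔ ((x, y) ∈ tl) := by
          simp [Prod.ext_iff]; tauto
        rw [if_congr hmem rfl rfl]

theorem setAll {R C : Nat} (g : Nat × Nat → Int) :
    ∀ (ps : List (Nat × Nat)) (E : List (List Int)), Rect R C E →
      (∀ p ∈ ps, p.1 < R ∧ p.2 < C) → ps.Nodup →
      Rect R C (ps.foldl (fun E p => set2 E p.1 p.2 (g p)) E) ∧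
      ∀ x y, get2 (ps.foldl (fun E p => set2 E p.1 p.2 (g p)) E) x y
           = if (x, y) ∈ ps then g (x, y) else get2 E x y := by
  intro ps
  induction ps with
  | nil => intro E hE _ _; exact ⟨hE, by simp⟩
  | cons p tl ih =>
    obtain ⟨p1, p2⟩ := p
    intro E hE hb hnd
    have hp := hb (p1, p2) (List.mem_cons_self ..)
    simp only at hp
    have hE' : Rect R C (set2 E p1 p2 (g (p1, p2))) := rect_set2 hE _ _ _ hp.1
    obtain ⟨ih1, ih2⟩ := ih _ hE' (fun q hq => hb q (List.mem_cons_of_mem _ hq))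
      (List.Nodup.of_cons hnd)
    constructor
    · simpa using ih1
    · intro x y
      simp only [List.foldl_cons]
      rw [ih2]
      by_cases hxy : x = p1 ∧ y = p2
      · obtain ⟨rfl, rfl⟩ := hxy
        have hnotin : (x, y) ∉ tl := by
          have := (List.nodup_cons.mp hnd).1; simpa using this
        rw [get2_set2_self _ _ _ _ (by obtain ⟨hl,_⟩ := hE; omega)
          (by rw [rect_row_len hE hp.1]; exact hp.2)]
        simp [hnotin]
      · rw [get2_set2_ne _ _ _ _ _ _ hxy]
        have hmem : ((x, y) ∈ (p1, p2) :: tl) ↔ ((x, y) ∈ tl) := by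
          simp [Prod.ext_iff]; tauto
        rw [if_congr hmem rfl rfl]

theorem all_congr' {α : Type} {l : List α} {f g : α → Bool}
    (h : ∀ x ∈ l, f x = g x) : l.all f = l.all g := by
  induction l with
  | nil => rfl
  | cons a tl ih => simp_all

theorem checkAll (w : Nat × Nat → Int) :
    ∀ (ps : List (Nat × Nat)) (E : List (List Int)), ps.Nodup →
      (ps.foldl (fun st p =>
          st.bind fun E =>
            if get2 E p.1 p.2 + w p ≠ 1 then none
            else some (set2 E p.1 p.2 (get2 E p.1 p.2 + w p))) (some E)).isSome
      = ps.all (fun p => get2 E p.1 p.2 + w p == 1) := by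
  intro ps
  induction ps with
  | nil => intro E _; rfl
  | cons p tl ih =>
    intro E hnd
    simp only [List.foldl_cons, List.all_cons, Option.bind_some]
    by_cases hv : get2 E p.1 p.2 + w p = 1
    · rw [if_neg (by simp [hv] : ¬ get2 E p.1 p.2 + w p ≠ 1), ih _ (List.Nodup.of_cons hnd)]
      have hcg : tl.all (fun q => get2 (set2 E p.1 p.2 (get2 E p.1 p.2 + w p)) q.1 q.2 + w q == 1)
          = tl.all (fun q => get2 E q.1 q.2 + w q == 1) := by
        refine all_congr' (fun q hq => ?_)
        have hqp : q ≠ p := by rintro rfl; exact (List.nodup_cons.mp hnd).1 hq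
        rw [get2_set2_ne _ _ _ _ _ _ (by
          obtain ⟨q1,q2⟩ := q; obtain ⟨pp1,pp2⟩ := p
          rintro ⟨rfl, rfl⟩; exact hqp rfl)]
      rw [hcg]
      simp [hv]
    · rw [if_pos hv]
      have hnone : ∀ (l : List (Nat × Nat)), (l.foldl (fun st p =>
          st.bind fun E =>
            if get2 E p.1 p.2 + w p ≠ 1 then none
            else some (set2 E p.1 p.2 (get2 E p.1 p.2 + w p))) none) = none := by
        intro l; induction l with
        | nil => rfl
        | cons a tl2 ih2 => simpa using ih2
      rw [hnone]
      simp [hv]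

theorem foldl_prod {α β γ : Type} (l1 : List α) (l2 : List β) (f : γ → α × β → γ) (b : γ) :
    l1.foldl (fun b a => l2.foldl (fun b x => f b (a, x)) b) b
      = (l1.product l2).foldl f b := by
  simp [List.product, List.foldl_flatMap, List.foldl_map]

theorem foldl_prod2 {α β γ : Type} (l1 : List α) (l2 : List β) (f : γ → α → β → γ) (b : γ) :
    l1.foldl (fun b a => l2.foldl (fun b x => f b a x) b) b
      = (l1.product l2).foldl (fun b p => f b p.1 p.2) b := by
  simp [List.product, List.foldl_flatMap, List.foldl_map]

theorem rot_spec (key : List (List Int)) :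
    Rect key.length key.length (pyRotation key) ∧
    ∀ x y, x < key.length → y < key.length →
      get2 (pyRotation key) x y = get2 key (key.length - 1 - y) x := by
  set m := key.length with hm
  have e0rect : Rect m m (List.replicate m (List.replicate m (0 : Int))) := by
    exact ⟨by simp, fun row hrow => by simp [List.eq_of_mem_replicate hrow]⟩
  have hstep : pyRotation key
      = (((List.range m).product (List.range m)).map (fun p => (p.2, m - 1 - p.1))).foldl
          (fun E q => set2 E q.1 q.2 (get2 key (m - 1 - q.2) q.1))
          (List.replicate m (List.replicate m (0 : Int))) := by
    show (List.range m).foldl _ _ = _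
    rw [foldl_prod (f := fun E p => set2 E p.2 (m - 1 - p.1) (get2 key p.1 p.2))]
    rw [List.foldl_map]
    refine PySem.List.foldl_congr_mem _ _ _ _ ?_
    intro E p hp
    obtain ⟨p1, p2⟩ := p
    have h1 : p1 < m := List.mem_range.mp (List.pair_mem_product.mp hp).1
    simp only
    have he : m - 1 - (m - 1 - p1) = p1 := by omega
    rw [he]
  have hnd : ((((List.range m).product (List.range m)).map (fun p => (p.2, m - 1 - p.1)))).Nodup := by
    refine List.Nodup.map_on ?_ (List.Nodup.product List.nodup_range List.nodup_range)
    intro p hp q hq hpq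
    obtain ⟨p1, p2⟩ := p; obtain ⟨q1, q2⟩ := q
    have h1 : p1 < m := List.mem_range.mp (List.pair_mem_product.mp hp).1
    have h2 : q1 < m := List.mem_range.mp (List.pair_mem_product.mp hq).1
    simp only [Prod.mk.injEq] at hpq ⊢
    omega
  have hb : ∀ q ∈ (((List.range m).product (List.range m)).map (fun p => (p.2, m - 1 - p.1))),
      q.1 < m ∧ q.2 < m := by
    intro q hq
    obtain ⟨p, hp, rfl⟩ := List.mem_map.mp hq
    have h1 : p.1 < m := List.mem_range.mp (List.pair_mem_product.mp hp).1
    have h2 : p.2 < m := List.mem_range.mp (List.pair_mem_product.mp hp).2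
    exact ⟨h2, by omega⟩
  obtain ⟨hrect, hget⟩ := setAll (R := m) (C := m)
    (fun q => get2 key (m - 1 - q.2) q.1) _ _ e0rect hb hnd
  rw [← hstep] at hrect hget
  refine ⟨hrect, ?_⟩
  intro x y hx hy
  rw [hget x y]
  have hmem : ((x, y) ∈ (((List.range m).product (List.range m)).map (fun p => (p.2, m - 1 - p.1)))) := by
    refine List.mem_map.mpr ⟨(m - 1 - y, x), ?_, ?_⟩
    · exact List.pair_mem_product.mpr ⟨List.mem_range.mpr (by omega), List.mem_range.mpr hx⟩
    · have h2 : m - 1 - (m - 1 - y) = y := by omega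
      rw [h2]
  rw [if_pos hmem]

theorem test_eq (key lock : List (List Int)) (sx sy n : Nat) (h1 : 1 ≤ key.length)
    (hsx : sx < key.length - 1 + n) (hsy : sy < key.length - 1 + n) :
    test key lock sx sy (n + (key.length - 1) * 2) (key.length - 1) (key.length - 1 + n)
    = ((List.range' (key.length - 1) n).product (List.range' (key.length - 1) n)).all
        (fun p => (if sx ≤ p.1 ∧ p.1 < sx + key.length ∧ sy ≤ p.2 ∧ p.2 < sy + key.length
           then get2 key (p.1 - sx) (p.2 - sy) else 0)
          + get2 lock (p.1 - (key.length - 1)) (p.2 - (key.length - 1)) == 1) := by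
  have hfin : key.length - 1 + n - (key.length - 1) = n := by omega
  have e0rect : Rect (n + (key.length - 1) * 2) (n + (key.length - 1) * 2)
      (List.replicate (n + (key.length - 1) * 2) (List.replicate (n + (key.length - 1) * 2) (0 : Int))) :=
    ⟨by simp, fun row hrow => by simp [List.eq_of_mem_replicate hrow]⟩
  have hnd : ((((List.range key.length).product (List.range key.length)).map
      (fun p => (sx + p.1, sy + p.2)))).Nodup := by
    refine List.Nodup.map_on ?_ (List.Nodup.product List.nodup_range List.nodup_range)
    intro p hp q hq hpq
    obtain ⟨p1, p2⟩ := p; obtain ⟨q1, q2⟩ := q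
    simp only [Prod.mk.injEq] at hpq ⊢
    omega
  have hb : ∀ q ∈ (((List.range key.length).product (List.range key.length)).map
      (fun p => (sx + p.1, sy + p.2))),
      q.1 < n + (key.length - 1) * 2 ∧ q.2 < n + (key.length - 1) * 2 := by
    intro q hq
    obtain ⟨p, hp, rfl⟩ := List.mem_map.mp hq
    have h1' : p.1 < key.length := List.mem_range.mp (List.pair_mem_product.mp hp).1
    have h2' : p.2 < key.length := List.mem_range.mp (List.pair_mem_product.mp hp).2
    constructor <;> simp only <;> omega
  obtain ⟨hrect, hget⟩ := addAll (R := n + (key.length - 1) * 2) (C := n + (key.length - 1) * 2)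
    (fun q => get2 key (q.1 - sx) (q.2 - sy)) _ _ e0rect hb hnd
  have hmem : ∀ x y, ((x, y) ∈ (((List.range key.length).product (List.range key.length)).map
        (fun p => (sx + p.1, sy + p.2))))
      ↔ (sx ≤ x ∧ x < sx + key.length ∧ sy ≤ y ∧ y < sy + key.length) := by
    intro x y
    constructor
    · intro h
      obtain ⟨⟨p1, p2⟩, hp, he⟩ := List.mem_map.mp h
      have h1' : p1 < key.length := List.mem_range.mp (List.pair_mem_product.mp hp).1
      have h2' : p2 < key.length := List.mem_range.mp (List.pair_mem_product.mp hp).2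
      simp only [Prod.mk.injEq] at he
      omega
    · intro ⟨ha, hb', hc, hd⟩
      refine List.mem_map.mpr ⟨(x - sx, y - sy), ?_, ?_⟩
      · exact List.pair_mem_product.mpr
          ⟨List.mem_range.mpr (by omega), List.mem_range.mpr (by omega)⟩
      · simp only [Prod.mk.injEq]
        constructor <;> omega
  unfold test
  simp only [hfin]
  rw [foldl_prod2 (l1 := List.range' (key.length - 1) n)]
  rw [foldl_prod2 (l1 := List.range key.length)]
  rw [show (((List.range key.length).product (List.range key.length)).foldl
      (fun E p => set2 E (sx + p.1) (sy + p.2)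
        (get2 E (sx + p.1) (sy + p.2) + get2 key p.1 p.2))
      (List.replicate (n + (key.length - 1) * 2)
        (List.replicate (n + (key.length - 1) * 2) (0 : Int))))
    = ((((List.range key.length).product (List.range key.length)).map
        (fun p => (sx + p.1, sy + p.2))).foldl
        (fun E q => set2 E q.1 q.2 (get2 E q.1 q.2 + get2 key (q.1 - sx) (q.2 - sy)))
        (List.replicate (n + (key.length - 1) * 2)
          (List.replicate (n + (key.length - 1) * 2) (0 : Int)))) from by
    rw [List.foldl_map]
    congr 1
    funext E p
    simp]
  refine Eq.trans (checkAll
      (fun p => get2 lock (p.1 - (key.length - 1)) (p.2 - (key.length - 1))) _ _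
      (List.Nodup.product (List.nodup_range' 1) (List.nodup_range' 1))) ?_
  refine all_congr' ?_
  intro p hp
  rw [hget p.1 p.2]
  rw [get2_replicate]
  have hmm := hmem p.1 p.2
  by_cases hc : sx ≤ p.1 ∧ p.1 < sx + key.length ∧ sy ≤ p.2 ∧ p.2 < sy + key.length
  · rw [if_pos (hmm.mpr hc), if_pos hc]
    simp [add_comm]
  · rw [if_neg (fun hmm2 => hc (hmm.mp hmm2)), if_neg hc]
    simp

def rotN (key : List (List Int)) : Nat → List (List Int)
  | 0 => key
  | t + 1 => pyRotation (rotN key t)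

theorem solLoop_succ (lock : List (List Int)) (es st fin t : Nat) (K : List (List Int)) :
    solLoop lock es st fin (t + 1) K
      = (((List.range fin).any fun i => (List.range fin).any fun j =>
          test K lock i j es st fin) || solLoop lock es st fin t (pyRotation K)) := by
  by_cases h : ((List.range fin).any fun i => (List.range fin).any fun j =>
      test K lock i j es st fin) = true
  · simp [solLoop, h]
  · simp [solLoop, h]

theorem test_true_iff (K lock : List (List Int)) (sx sy n : Nat) (h1 : 1 ≤ K.length)
    (hsx : sx < K.length - 1 + n) (hsy : sy < K.length - 1 + n) :
    (test K lock sx sy (n + (K.length - 1) * 2) (K.length - 1) (K.length - 1 + n) = true)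
    ↔ (∀ r, r < n → ∀ c, c < n →
        (if sx ≤ K.length - 1 + r ∧ K.length - 1 + r < sx + K.length ∧
            sy ≤ K.length - 1 + c ∧ K.length - 1 + c < sy + K.length
         then get2 K (K.length - 1 + r - sx) (K.length - 1 + c - sy) else 0)
          + get2 lock r c = 1) := by
  rw [test_eq K lock sx sy n h1 hsx hsy, List.all_eq_true]
  constructor
  · intro h r hr c hc
    have hm := h ((K.length - 1 + r), (K.length - 1 + c)) (List.pair_mem_product.mpr
      ⟨List.mem_range'_1.mpr ⟨by omega, by omega⟩, List.mem_range'_1.mpr ⟨by omega, by omega⟩⟩)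
    simp only [beq_iff_eq] at hm
    have er : K.length - 1 + r - (K.length - 1) = r := by omega
    have ec : K.length - 1 + c - (K.length - 1) = c := by omega
    rw [er, ec] at hm
    exact hm
  · intro h p hp
    obtain ⟨p1, p2⟩ := p
    obtain ⟨hp1, hp2⟩ := List.pair_mem_product.mp hp
    rw [List.mem_range'_1] at hp1 hp2
    simp only [beq_iff_eq]
    have e1 : K.length - 1 + (p1 - (K.length - 1)) = p1 := by omega
    have e2 : K.length - 1 + (p2 - (K.length - 1)) = p2 := by omega
    have hm := h (p1 - (K.length - 1)) (by omega) (p2 - (K.length - 1)) (by omega)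
    rw [e1, e2] at hm
    exact hm

theorem any_test_iff (key lock : List (List Int)) (K : List (List Int))
    (hK : K.length = key.length) (h1 : 1 ≤ key.length) :
    (((List.range (key.length - 1 + lock.length)).any fun i =>
        (List.range (key.length - 1 + lock.length)).any fun j =>
          test K lock i j (lock.length + (key.length - 1) * 2) (key.length - 1)
            (key.length - 1 + lock.length)) = true)
    ↔ (∃ sx, sx < key.length - 1 + lock.length ∧ ∃ sy, sy < key.length - 1 + lock.length ∧
        ∀ r, r < lock.length → ∀ c, c < lock.length →
          (if sx ≤ key.length - 1 + r ∧ key.length - 1 + r < sx + key.length ∧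
              sy ≤ key.length - 1 + c ∧ key.length - 1 + c < sy + key.length
           then get2 K (key.length - 1 + r - sx) (key.length - 1 + c - sy) else 0)
            + get2 lock r c = 1) := by
  rw [← hK]
  simp only [List.any_eq_true, List.mem_range]
  constructor
  · rintro ⟨sx, hsx, sy, hsy, ht⟩
    exact ⟨sx, hsx, sy, hsy, (test_true_iff K lock sx sy lock.length
      (by omega) hsx hsy).mp ht⟩
  · rintro ⟨sx, hsx, sy, hsy, hap⟩
    exact ⟨sx, hsx, sy, hsy, (test_true_iff K lock sx sy lock.length
      (by omega) hsx hsy).mpr hap⟩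

theorem sol_iff (key lock : List (List Int)) (h1 : 1 ≤ key.length) :
    (solution key lock = true)
    ↔ (∃ t, t < 4 ∧ ∃ sx, sx < key.length - 1 + lock.length ∧
        ∃ sy, sy < key.length - 1 + lock.length ∧
        ∀ r, r < lock.length → ∀ c, c < lock.length →
          (if sx ≤ key.length - 1 + r ∧ key.length - 1 + r < sx + key.length ∧
              sy ≤ key.length - 1 + c ∧ key.length - 1 + c < sy + key.length
           then get2 (rotN key t) (key.length - 1 + r - sx) (key.length - 1 + c - sy) else 0)
            + get2 lock r c = 1) := by
  show (solLoop lock (lock.length + (key.length - 1) * 2) (key.length - 1)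
      (key.length - 1 + lock.length) 4 key = true) ↔ _
  rw [solLoop_succ, solLoop_succ, solLoop_succ, solLoop_succ,
    show solLoop lock (lock.length + (key.length - 1) * 2) (key.length - 1)
      (key.length - 1 + lock.length) 0 (pyRotation (pyRotation (pyRotation (pyRotation key)))) = false from rfl]
  simp only [Bool.or_false, Bool.or_eq_true]
  rw [any_test_iff key lock key rfl h1,
    any_test_iff key lock (pyRotation key) ((rot_spec key).1.1) h1,
    any_test_iff key lock (pyRotation (pyRotation key))
      (by rw [(rot_spec _).1.1, (rot_spec _).1.1] : (pyRotation (pyRotation key)).length = key.length) h1,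
    any_test_iff key lock (pyRotation (pyRotation (pyRotation key)))
      (by rw [(rot_spec _).1.1, (rot_spec _).1.1, (rot_spec _).1.1] :
        (pyRotation (pyRotation (pyRotation key))).length = key.length) h1]
  constructor
  · rintro (h | h | h | h)
    · exact ⟨0, by omega, h⟩
    · exact ⟨1, by omega, h⟩
    · exact ⟨2, by omega, h⟩
    · exact ⟨3, by omega, h⟩
  · rintro ⟨t, ht, h⟩
    interval_cases t
    · exact Or.inl h
    · exact Or.inr (Or.inl h)
    · exact Or.inr (Or.inr (Or.inl h))
    · exact Or.inr (Or.inr (Or.inr h))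

-- ===== B-side lemmas =====

-- characterisation of a cell list: exactly the nonzero cells of the m×m matrix K
def CellsOf (m : Nat) (K : List (List Int)) (L : List (Int × Int × Int)) : Prop :=
  ∀ x y v : Int, ((x, y, v) ∈ L ↔
    0 ≤ x ∧ x < (m : Int) ∧ 0 ≤ y ∧ y < (m : Int) ∧ v = get2 K x.toNat y.toNat ∧ v ≠ 0)

-- the per-placement condition both programs decide
def QK (mI : Int) (K lock : List (List Int)) (di dj : Int) : Prop :=
  ∀ r : Nat, r < lock.length → ∀ c : Nat, c < lock.length →
    get2 lock r c +
      (if 0 ≤ (r : Int) - di ∧ (r : Int) - di < mI ∧ 0 ≤ (c : Int) - dj ∧ (c : Int) - dj < mI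
       then get2 K ((r : Int) - di).toNat ((c : Int) - dj).toNat else 0) = 1

theorem mem_bDeficits (lock : List (List Int)) (x y : Int) :
    ((x, y) ∈ bDeficits lock) ↔
    (0 ≤ x ∧ x < (lock.length : Int) ∧ 0 ≤ y ∧ y < (lock.length : Int) ∧
      get2 lock x.toNat y.toNat ≠ 1) := by
  simp only [bDeficits, List.mem_flatMap, List.mem_filterMap, List.mem_range]
  constructor
  · rintro ⟨r, hr, c, hc, h⟩
    split_ifs at h with hne
    · simp only [Option.some.injEq, Prod.mk.injEq] at h
      obtain ⟨hx, hy⟩ := h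
      subst hx; subst hy
      refine ⟨by omega, by omega, by omega, by omega, ?_⟩
      simpa using hne
  · rintro ⟨hx0, hxn, hy0, hyn, hne⟩
    refine ⟨x.toNat, by omega, y.toNat, by omega, ?_⟩
    rw [if_pos hne]
    simp only [Option.some.injEq, Prod.mk.injEq]
    omega

theorem cellsOf_bCells (key : List (List Int)) : CellsOf key.length key (bCells key) := by
  intro x y v
  simp only [bCells, List.mem_flatMap, List.mem_filterMap, List.mem_range]
  constructor
  · rintro ⟨a, ha, b, hb, h⟩
    split_ifs at h with hne
    · simp only [Option.some.injEq, Prod.mk.injEq] at h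
      obtain ⟨hx, hy, hv⟩ := h
      subst hx; subst hy; subst hv
      exact ⟨by omega, by omega, by omega, by omega, by simp, hne⟩
  · rintro ⟨hx0, hxm, hy0, hym, hv, hne⟩
    refine ⟨x.toNat, by omega, y.toNat, by omega, ?_⟩
    rw [if_pos (hv ▸ hne)]
    simp only [Option.some.injEq, Prod.mk.injEq]
    refine ⟨by omega, by omega, hv.symm⟩

theorem getL_natCast (xs : List (List Int)) (i j : Int) :
    getL xs i j = get2 xs i.toNat j.toNat := rfl

theorem cellsOf_rot (m : Nat) (K : List (List Int)) (hK : K.length = m)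
    (L : List (Int × Int × Int)) (hC : CellsOf m K L) :
    CellsOf m (pyRotation K) (L.map fun c => (c.2.1, (m : Int) - 1 - c.1, c.2.2)) := by
  have hget := (rot_spec K).2
  intro x y v
  rw [List.mem_map]
  constructor
  · rintro ⟨⟨a, b, w⟩, hmem, heq⟩
    simp only [Prod.mk.injEq] at heq
    obtain ⟨hx, hy, hv⟩ := heq
    obtain ⟨ha0, ham, hb0, hbm, hw, hwne⟩ := (hC a b w).mp hmem
    subst hx; subst hy; subst hv
    refine ⟨by omega, by omega, by omega, by omega, ?_, hwne⟩
    rw [hK] at hget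
    have := hget b.toNat ((m : Int) - 1 - a).toNat (by omega) (by omega)
    rw [this]
    have e : m - 1 - ((m : Int) - 1 - a).toNat = a.toNat := by omega
    rw [e, ← hw]
  · rintro ⟨hx0, hxm, hy0, hym, hv, hne⟩
    refine ⟨((m : Int) - 1 - y, x, v), ?_, ?_⟩
    · refine (hC _ _ _).mpr ⟨by omega, by omega, hx0, hxm, ?_, hne⟩
      rw [hK] at hget
      have := hget x.toNat y.toNat (by omega) (by omega)
      rw [hv, this]
      congr 1
      omega
    · show ((x : Int), (m : Int) - 1 - ((m : Int) - 1 - y), v) = (x, y, v)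
      have e : (m : Int) - 1 - ((m : Int) - 1 - y) = y := by omega
      rw [e]

theorem rotN_len (key : List (List Int)) (t : Nat) : (rotN key t).length = key.length := by
  induction t with
  | zero => rfl
  | succ t ih => show (pyRotation (rotN key t)).length = _; rw [(rot_spec _).1.1, ih]

theorem bCheck_iff (lock K : List (List Int)) (m : Nat) (cells : List (Int × Int × Int))
    (hC : CellsOf m K cells) (di dj : Int) :
    (bCheck lock (lock.length : Int) (bDeficits lock) (PySem.Set.ofList cells) cells di dj = true)
    ↔ QK (m : Int) K lock di dj := by
  unfold bCheck
  rw [Bool.and_eq_true, List.all_eq_true, List.all_eq_true]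
  constructor
  · rintro ⟨h1, h2⟩ r hr c hc
    by_cases hL : get2 lock r c = 1
    · by_cases hcnd : 0 ≤ (r : Int) - di ∧ (r : Int) - di < (m : Int) ∧
          0 ≤ (c : Int) - dj ∧ (c : Int) - dj < (m : Int)
      · rw [if_pos hcnd]
        by_cases hv : get2 K ((r : Int) - di).toNat ((c : Int) - dj).toNat = 0
        · omega
        · have hmem : ((r : Int) - di, (c : Int) - dj,
              get2 K ((r : Int) - di).toNat ((c : Int) - dj).toNat) ∈ cells :=
            (hC _ _ _).mpr ⟨hcnd.1, hcnd.2.1, hcnd.2.2.1, hcnd.2.2.2, rfl, hv⟩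
          have := h2 _ hmem
          simp only at this
          rw [if_pos (by constructor <;> [omega; constructor <;> [omega; constructor <;> omega]])] at this
          rw [beq_iff_eq] at this
          have eg : getL lock ((r : Int) - di + di) ((c : Int) - dj + dj) = get2 lock r c := by
            rw [getL_natCast]; congr 1 <;> omega
          rw [eg] at this
          omega
      · rw [if_neg hcnd]; omega
    · have hd : (((r : Int), (c : Int)) ∈ bDeficits lock) :=
        (mem_bDeficits lock _ _).mpr ⟨by omega, by omega, by omega, by omega, by simpa using hL⟩
      have := h1 _ hd
      simp only [PySem.Set.contains_iff, PySem.Set.mem_ofList] at this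
      have eg : getL lock (r : Int) (c : Int) = get2 lock r c := by
        rw [getL_natCast]; congr 1
      rw [eg] at this
      obtain ⟨ha0, ham, hb0, hbm, hw, _⟩ := (hC _ _ _).mp this
      rw [if_pos ⟨ha0, ham, hb0, hbm⟩]
      omega
  · intro hQ
    constructor
    · rintro ⟨x, y⟩ hp
      obtain ⟨hx0, hxn, hy0, hyn, hne⟩ := (mem_bDeficits lock x y).mp hp
      have hq := hQ x.toNat (by omega) y.toNat (by omega)
      have ex : ((x.toNat : Nat) : Int) = x := by omega
      have ey : ((y.toNat : Nat) : Int) = y := by omega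
      rw [ex, ey] at hq
      by_cases hcnd : 0 ≤ x - di ∧ x - di < (m : Int) ∧ 0 ≤ y - dj ∧ y - dj < (m : Int)
      · rw [if_pos hcnd] at hq
        simp only [PySem.Set.contains_iff, PySem.Set.mem_ofList]
        have eg : getL lock x y = get2 lock x.toNat y.toNat := rfl
        rw [eg]
        exact (hC _ _ _).mpr ⟨hcnd.1, hcnd.2.1, hcnd.2.2.1, hcnd.2.2.2, by omega, by omega⟩
      · rw [if_neg hcnd] at hq; omega
    · rintro ⟨a, b, v⟩ hmem
      obtain ⟨ha0, ham, hb0, hbm, hv, hne⟩ := (hC a b v).mp hmem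
      simp only
      by_cases hg : 0 ≤ a + di ∧ a + di < (lock.length : Int) ∧
          0 ≤ b + dj ∧ b + dj < (lock.length : Int)
      · rw [if_pos hg, beq_iff_eq]
        have hq := hQ (a + di).toNat (by omega) (b + dj).toNat (by omega)
        have ea : (((a + di).toNat : Nat) : Int) - di = a := by omega
        have eb : (((b + dj).toNat : Nat) : Int) - dj = b := by omega
        rw [ea, eb, if_pos ⟨ha0, ham, hb0, hbm⟩] at hq
        have eg : getL lock (a + di) (b + dj) = get2 lock (a + di).toNat (b + dj).toNat := rfl
        rw [eg]
        rw [← hv] at hq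
        omega
      · rw [if_neg hg]
  
theorem bStep_iff (lock K : List (List Int)) (m : Nat) (cells : List (Int × Int × Int))
    (hC : CellsOf m K cells) :
    (bStep lock (m : Int) (lock.length : Int) (bDeficits lock) cells = true)
    ↔ ∃ di dj : Int, (-(m : Int) + 1 ≤ di ∧ di < (lock.length : Int)) ∧
        (-(m : Int) + 1 ≤ dj ∧ dj < (lock.length : Int)) ∧ QK (m : Int) K lock di dj := by
  unfold bStep
  cases hdef : bDeficits lock with
  | nil =>
    simp only [List.any_eq_true, List.mem_flatMap, List.mem_map, PySem.List.mem_pyRange_one]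
    constructor
    · rintro ⟨⟨di, dj⟩, ⟨di', hdi', dj', hdj', heq⟩, hchk⟩
      simp only [Prod.mk.injEq] at heq
      obtain ⟨h1, h2⟩ := heq
      subst h1; subst h2
      have hchk' : bCheck lock (lock.length : Int) (bDeficits lock)
          (PySem.Set.ofList cells) cells di' dj' = true := by rw [hdef]; exact hchk
      exact ⟨di', dj', by constructor <;> omega, by constructor <;> omega,
        (bCheck_iff lock K m cells hC di' dj').mp hchk'⟩
    · rintro ⟨di, dj, hdi, hdj, hQ⟩
      refine ⟨(di, dj), ⟨di, by constructor <;> omega, dj, by constructor <;> omega, rfl⟩, ?_⟩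
      have := (bCheck_iff lock K m cells hC di dj).mpr hQ
      rw [hdef] at this
      exact this
  | cons hd tl =>
    obtain ⟨r0, c0⟩ := hd
    have hr0 : ((r0, c0) ∈ bDeficits lock) := by rw [hdef]; exact List.mem_cons_self ..
    obtain ⟨hr00, hr0n, hc00, hc0n, hLne⟩ := (mem_bDeficits lock r0 c0).mp hr0
    constructor
    · intro hx
      simp only [List.any_eq_true, List.mem_filterMap] at hx
      obtain ⟨⟨di, dj⟩, ⟨⟨a, b, v⟩, hmem, hsome⟩, hchk⟩ := hx
      split_ifs at hsome with hv
      · simp only [Option.some.injEq, Prod.mk.injEq] at hsome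
        obtain ⟨h1, h2⟩ := hsome
        subst h1; subst h2
        obtain ⟨ha0, ham, hb0, hbm, _, _⟩ := (hC a b v).mp hmem
        have hchk' : bCheck lock (lock.length : Int) (bDeficits lock)
            (PySem.Set.ofList cells) cells (r0 - a) (c0 - b) = true := by
          rw [hdef]; exact hchk
        exact ⟨r0 - a, c0 - b, by constructor <;> omega, by constructor <;> omega,
          (bCheck_iff lock K m cells hC _ _).mp hchk'⟩
    · rintro ⟨di, dj, _, _, hQ⟩
      have hq := hQ r0.toNat (by omega) c0.toNat (by omega)
      have ex : ((r0.toNat : Nat) : Int) = r0 := by omega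
      have ey : ((c0.toNat : Nat) : Int) = c0 := by omega
      rw [ex, ey] at hq
      by_cases hcnd : 0 ≤ r0 - di ∧ r0 - di < (m : Int) ∧ 0 ≤ c0 - dj ∧ c0 - dj < (m : Int)
      · rw [if_pos hcnd] at hq
        have hmem : ((r0 - di, c0 - dj, 1 - get2 lock r0.toNat c0.toNat) ∈ cells) :=
          (hC _ _ _).mpr ⟨hcnd.1, hcnd.2.1, hcnd.2.2.1, hcnd.2.2.2, by omega, by omega⟩
        simp only [List.any_eq_true, List.mem_filterMap]
        refine ⟨(di, dj), ⟨(r0 - di, c0 - dj, 1 - get2 lock r0.toNat c0.toNat), hmem, ?_⟩, ?_⟩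
        · rw [if_pos (by rw [getL_natCast])]
          simp only [Option.some.injEq, Prod.mk.injEq]
          constructor <;> omega
        · have := (bCheck_iff lock K m cells hC di dj).mpr hQ
          rw [hdef] at this
          exact this
      · rw [if_neg hcnd] at hq; omega

theorem bLoop_succ (lock : List (List Int)) (mI n : Int) (defs : List (Int × Int))
    (t : Nat) (cells : List (Int × Int × Int)) :
    bLoop lock mI n defs (t + 1) cells
      = (bStep lock mI n defs cells ||
          bLoop lock mI n defs t (cells.map fun c => (c.2.1, mI - 1 - c.1, c.2.2))) := by
  by_cases h : bStep lock mI n defs cells = true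
  · simp [bLoop, h]
  · simp [bLoop, h]

theorem alt_iff (key lock : List (List Int)) :
    (solution_alt key lock = true)
    ↔ ∃ t, t < 4 ∧ ∃ di dj : Int,
        (-(key.length : Int) + 1 ≤ di ∧ di < (lock.length : Int)) ∧
        (-(key.length : Int) + 1 ≤ dj ∧ dj < (lock.length : Int)) ∧
        QK (key.length : Int) (rotN key t) lock di dj := by
  have hC0 : CellsOf key.length (rotN key 0) (bCells key) := cellsOf_bCells key
  have hC1 := cellsOf_rot key.length (rotN key 0) (rotN_len key 0) _ hC0
  have hC2 := cellsOf_rot key.length (rotN key 1) (rotN_len key 1) _ hC1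
  have hC3 := cellsOf_rot key.length (rotN key 2) (rotN_len key 2) _ hC2
  show bLoop lock (key.length : Int) (lock.length : Int) (bDeficits lock) 4 (bCells key) = true ↔ _
  rw [bLoop_succ, bLoop_succ, bLoop_succ, bLoop_succ]
  rw [show ∀ c, bLoop lock (key.length : Int) (lock.length : Int) (bDeficits lock) 0 c = false
    from fun _ => rfl]
  simp only [Bool.or_false, Bool.or_eq_true]
  rw [bStep_iff lock (rotN key 0) key.length _ hC0,
    bStep_iff lock (rotN key 1) key.length _ hC1,
    bStep_iff lock (rotN key 2) key.length _ hC2,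
    bStep_iff lock (rotN key 3) key.length _ hC3]
  constructor
  · rintro (h | h | h | h)
    · exact ⟨0, by omega, h⟩
    · exact ⟨1, by omega, h⟩
    · exact ⟨2, by omega, h⟩
    · exact ⟨3, by omega, h⟩
  · rintro ⟨t, ht, h⟩
    interval_cases t
    · exact Or.inl h
    · exact Or.inr (Or.inl h)
    · exact Or.inr (Or.inr (Or.inl h))
    · exact Or.inr (Or.inr (Or.inr h))

theorem ap_bp (key lock : List (List Int)) (h1 : 1 ≤ key.length) (t : Nat) :
    ((∃ sx, sx < key.length - 1 + lock.length ∧ ∃ sy, sy < key.length - 1 + lock.length ∧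
        ∀ r, r < lock.length → ∀ c, c < lock.length →
          (if sx ≤ key.length - 1 + r ∧ key.length - 1 + r < sx + key.length ∧
              sy ≤ key.length - 1 + c ∧ key.length - 1 + c < sy + key.length
           then get2 (rotN key t) (key.length - 1 + r - sx) (key.length - 1 + c - sy) else 0)
          + get2 lock r c = 1)
     ↔ (∃ di dj : Int, (-(key.length : Int) + 1 ≤ di ∧ di < (lock.length : Int)) ∧
          (-(key.length : Int) + 1 ≤ dj ∧ dj < (lock.length : Int)) ∧
          QK (key.length : Int) (rotN key t) lock di dj)) := by
  have hsum : ∀ (sx sy r c : Nat),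
      (if sx ≤ key.length - 1 + r ∧ key.length - 1 + r < sx + key.length ∧
          sy ≤ key.length - 1 + c ∧ key.length - 1 + c < sy + key.length
       then get2 (rotN key t) (key.length - 1 + r - sx) (key.length - 1 + c - sy) else 0)
      = (if 0 ≤ (r : Int) - ((sx : Int) - ((key.length : Int) - 1)) ∧
            (r : Int) - ((sx : Int) - ((key.length : Int) - 1)) < (key.length : Int) ∧
            0 ≤ (c : Int) - ((sy : Int) - ((key.length : Int) - 1)) ∧
            (c : Int) - ((sy : Int) - ((key.length : Int) - 1)) < (key.length : Int)
         then get2 (rotN key t) ((r : Int) - ((sx : Int) - ((key.length : Int) - 1))).toNat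
              ((c : Int) - ((sy : Int) - ((key.length : Int) - 1))).toNat else 0) := by
    intro sx sy r c
    by_cases hcnd : sx ≤ key.length - 1 + r ∧ key.length - 1 + r < sx + key.length ∧
        sy ≤ key.length - 1 + c ∧ key.length - 1 + c < sy + key.length
    · rw [if_pos hcnd, if_pos (by omega)]
      congr 1 <;> omega
    · rw [if_neg hcnd, if_neg (by omega)]
  constructor
  · rintro ⟨sx, hsx, sy, hsy, h⟩
    refine ⟨(sx : Int) - ((key.length : Int) - 1), (sy : Int) - ((key.length : Int) - 1),
      by constructor <;> omega, by constructor <;> omega, ?_⟩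
    intro r hr c hc
    have := h r hr c hc
    rw [hsum sx sy r c] at this
    omega
  · rintro ⟨di, dj, hdi, hdj, hQ⟩
    refine ⟨(di + ((key.length : Int) - 1)).toNat, by omega,
      (dj + ((key.length : Int) - 1)).toNat, by omega, ?_⟩
    intro r hr c hc
    have hq := hQ r hr c hc
    have hdix : (((di + ((key.length : Int) - 1)).toNat : Nat) : Int) - ((key.length : Int) - 1) = di := by omega
    have hdjx : (((dj + ((key.length : Int) - 1)).toNat : Nat) : Int) - ((key.length : Int) - 1) = dj := by omega
    rw [hsum, hdix, hdjx]
    omega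

theorem sol_eq_alt (key lock : List (List Int)) (h1 : 1 ≤ key.length) :
    solution key lock = solution_alt key lock := by
  refine Bool.coe_iff_coe.mp ?_
  rw [sol_iff key lock h1, alt_iff key lock]
  exact exists_congr fun t => and_congr_right fun _ => ap_bp key lock h1 t

-- ===== VERDICT (by name: the statement is the Claim_ definition above) =====
theorem solution_spec : Claim_equal_solution := by
  intro key lock _hdom hpre
  unfold Spec_solution
  exact sol_eq_alt key lock hpre.1
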